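-- pv_equiv track=rewrite | github.com/mek-ctr/CSCE_CPD | E - Songs Compression.py | minimum_compressions
-- ===== SOURCE A (Python) =====
-- def minimum_compressions(n, m, songs):
-- # Step 1: Calculate total size with   out compression
--     total_size = sum(song[0] for song in songs)
--
--     # Step 2: If total size is already <= m, no compression is needed
--     if total_size <= m:
--         return 0
--
--     # Step 3: Calculate the potential gain from compression
--     gains = []
--     for song in songs:
--         ai, bi = song
--         gains.append(ai - bi)
--
--     # Step 4: Sort gains in descending order to compress the largest ones first
--     gains.sort(reverse=True)
--
--     # Step 5: Try to compress songs one by one, starting from the largest gain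
--     compressed_size = total_size
--     compress_count = 0
--     for gain in gains:
--         compressed_size -= gain
--         compress_count += 1
--
--         # If the total size is now within the capacity, return the result
--         if compressed_size <= m:
--             return compress_count
--
--     # Step 6: If we couldn't fit all songs even after full compression
--     return -1
-- ===== SOURCE B (Python) =====
-- def minimum_compressions(n, m, songs):
--     total = sum(a for a, b in songs)
--     if total <= m:
--         return 0
--     remaining = [a - b for a, b in songs]
--     size = total
--     count = 0
--     while remaining:
--         g = max(remaining)
--         remaining.remove(g)
--         size -= g
--         count += 1
--         if size <= m:
--             return count
--     return -1
-- ===== Notes on version B (the rewrite author's own statement) =====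
-- stated objective: alternative
-- what changed: B replaces A's full descending sort followed by a linear scan with a selection loop that repeatedly extracts the current maximum gain from the unsorted pool and stops as soon as the size fits.
import Mathlib
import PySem

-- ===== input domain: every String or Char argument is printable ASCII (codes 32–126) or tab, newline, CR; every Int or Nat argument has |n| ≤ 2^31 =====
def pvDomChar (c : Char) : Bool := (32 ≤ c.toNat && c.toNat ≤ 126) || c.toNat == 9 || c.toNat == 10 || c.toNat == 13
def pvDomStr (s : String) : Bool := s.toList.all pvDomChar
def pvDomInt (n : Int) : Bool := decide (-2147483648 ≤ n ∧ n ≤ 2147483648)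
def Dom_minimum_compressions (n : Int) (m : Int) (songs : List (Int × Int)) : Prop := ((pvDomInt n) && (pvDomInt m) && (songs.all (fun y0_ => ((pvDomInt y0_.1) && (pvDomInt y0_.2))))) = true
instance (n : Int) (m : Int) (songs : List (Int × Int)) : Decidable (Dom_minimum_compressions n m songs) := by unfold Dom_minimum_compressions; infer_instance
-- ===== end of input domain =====

-- B replaces A's full descending sort + scan with a selection loop (repeatedly extract the
-- current maximum gain until the size fits) — an alternative algorithm, not claimed faster.


-- ===== PORT A =====
-- A's final loop over the descending-sorted gains list
def pvLoopA (m : Int) : List Int → Int → Int → Int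
  | [], _, _ => -1
  | g :: rest, compressed_size, compress_count =>
      let compressed_size := compressed_size - g
      let compress_count := compress_count + 1
      if compressed_size ≤ m then compress_count
      else pvLoopA m rest compressed_size compress_count

def minimum_compressions (n : Int) (m : Int) (songs : List (Int × Int)) : Int :=
  let total_size := (songs.map (fun song => song.1)).sum
  if total_size ≤ m then 0
  else
    let gains := songs.foldl (fun acc song => acc ++ [song.1 - song.2]) []
    let gains := PySem.List.sorted gains (fun x => x) true
    pvLoopA m gains total_size 0

-- ===== PORT B =====
-- B's while loop: pop the maximum of the unsorted pool each iteration.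
-- remaining.remove(g) with g = max(remaining) ∈ remaining is List.erase g
-- (PySem.List.remove?_eq_some_erase).
def pvLoopB (m : Int) (remaining : List Int) (size count : Int) : Int :=
  match hg : PySem.List.max? remaining (fun x => x) with
  | none => -1
  | some g =>
      let size := size - g
      if size ≤ m then count + 1
      else pvLoopB m (remaining.erase g) size (count + 1)
termination_by remaining.length
decreasing_by
  have hm : g ∈ remaining := PySem.List.max?_mem hg
  have := List.length_erase_of_mem hm
  have : 0 < remaining.length := List.length_pos_of_mem hm
  omega

def minimum_compressions_alt (n : Int) (m : Int) (songs : List (Int × Int)) : Int :=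
  let total := (songs.map (fun s => s.1)).sum
  if total ≤ m then 0
  else pvLoopB m (songs.map (fun s => s.1 - s.2)) total 0

-- ===== PRECONDITION & SPEC =====
def Spec_minimum_compressions (n : Int) (m : Int) (songs : List (Int × Int)) (out : Int) : Prop := out = minimum_compressions_alt n m songs
instance (n : Int) (m : Int) (songs : List (Int × Int)) (out : Int) : Decidable (Spec_minimum_compressions n m songs out) := by unfold Spec_minimum_compressions; infer_instance

-- ===== CLAIM (what is proved, stated in full; the proofs are below) =====
def Claim_equal_minimum_compressions : Prop := ∀ (n : Int) (m : Int) (songs : List (Int × Int)), Dom_minimum_compressions n m songs → Spec_minimum_compressions n m songs (minimum_compressions n m songs)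

-- ===== LEMMAS AND PROOFS =====

-- Descending sort puts the first maximum in front, the descending sort of the rest behind it.
lemma sorted_desc_cons_max {xs : List Int} {g : Int}
    (hg : PySem.List.max? xs (fun x => x) = some g) :
    PySem.List.sorted xs (fun x => x) true = g :: PySem.List.sorted (xs.erase g) (fun x => x) true := by
  have hmem : g ∈ xs := PySem.List.max?_mem hg
  have hmax : ∀ y ∈ xs, y ≤ g := fun y hy => PySem.List.max?_isMax hg y hy
  have hperm : (PySem.List.sorted xs (fun x => x) true).Perm
      (g :: PySem.List.sorted (xs.erase g) (fun x => x) true) :=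
    (PySem.List.sorted_perm xs _ true).trans
      ((List.perm_cons_erase hmem).trans
        (List.Perm.cons g (PySem.List.sorted_perm (xs.erase g) _ true).symm))
  have hs1 : (PySem.List.sorted xs (fun x => x) true).Pairwise (fun a b => b ≤ a) :=
    PySem.List.sorted_pairwise_rev xs (fun x => x)
  have hs2 : (g :: PySem.List.sorted (xs.erase g) (fun x => x) true).Pairwise (fun a b => b ≤ a) := by
    refine List.Pairwise.cons ?_ (PySem.List.sorted_pairwise_rev (xs.erase g) (fun x => x))
    intro y hy
    have : y ∈ xs.erase g := (PySem.List.mem_sorted _ _ _ _).mp hy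
    exact hmax y (List.mem_of_mem_erase this)
  exact hperm.eq_of_pairwise (fun a b _ _ h1 h2 => le_antisymm h2 h1) hs1 hs2

-- B's selection loop computes exactly A's scan over the descending-sorted gains.
lemma loopB_eq_loopA (m : Int) : ∀ (xs : List Int) (size count : Int),
    pvLoopB m xs size count = pvLoopA m (PySem.List.sorted xs (fun x => x) true) size count := by
  intro xs
  induction xs using (measure List.length).wf.induction with
  | _ xs ih =>
    intro size count
    rw [pvLoopB]
    cases hg : PySem.List.max? xs (fun x => x) with
    | none =>
        have : xs = [] := (PySem.List.max?_eq_none_iff xs (fun x => x)).mp hg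
        subst this
        simp [PySem.List.sorted, pvLoopA]
    | some g =>
        rw [sorted_desc_cons_max hg, pvLoopA]
        have hmem : g ∈ xs := PySem.List.max?_mem hg
        have hlt : (xs.erase g).length < xs.length := by
          have := List.length_erase_of_mem hmem
          have : 0 < xs.length := List.length_pos_of_mem hmem
          omega
        by_cases h : size - g ≤ m <;> simp [h, ih _ hlt]

-- gains built by foldl-append equals the map comprehension
lemma gains_eq (songs : List (Int × Int)) :
    songs.foldl (fun acc song => acc ++ [song.1 - song.2]) [] = songs.map (fun s => s.1 - s.2) := by
  simpa using PySem.List.foldl_append_singleton_eq_map (fun s : Int × Int => s.1 - s.2) songs []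

-- ===== VERDICT (by name: the statement is the Claim_ definition above) =====
theorem minimum_compressions_spec : Claim_equal_minimum_compressions := by
  intro n m songs _
  unfold Spec_minimum_compressions minimum_compressions minimum_compressions_alt
  by_cases h : (songs.map (fun song => song.1)).sum ≤ m
  · simp [h]
  · simp only [h, if_false, gains_eq]
    exact (loopB_eq_loopA m _ _ _).symm
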